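-- pv_equiv track=rewrite | github.com/wasdw1012/RSA-LLL-2.0 | mvp17_cfg_object_model.py | _bfs_depths
-- ===== SOURCE A (Python) =====
-- from typing import Any, Dict, Iterable, List, Mapping, Optional, Sequence, Tuple
--
-- def _bfs_depths(entry: int, adj: Mapping[int, Sequence[int]]) -> Dict[int, int]:
--     dist: Dict[int, int] = {int(entry): 0}
--     q = [int(entry)]
--     qi = 0
--     while qi < len(q):
--         u = q[qi]
--         qi += 1
--         du = dist[u]
--         for v in adj.get(u, []):
--             vv = int(v)
--             if vv not in dist:
--                 dist[vv] = du + 1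
--                 q.append(vv)
--     return dist
-- ===== SOURCE B (Python) =====
-- def _bfs_depths(entry, adj):
--     dist = {int(entry): 0}
--     frontier = [int(entry)]
--     depth = 0
--     while frontier:
--         depth += 1
--         nbrs = [int(v) for u in frontier for v in adj.get(u, [])]
--         new = []
--         for vv in nbrs:
--             if vv not in dist and vv not in new:
--                 new.append(vv)
--         for vv in new:
--             dist[vv] = depth
--         frontier = new
--     return dist
-- ===== Notes on version B (the rewrite author's own statement) =====
-- stated objective: alternative
-- what changed: Replaced the flat index-pointer queue with interleaved dist-insertions and per-node dist[u] reads by staged level-order passes: each round first flattens all neighbours of the frontier into one list, then dedups it against dist and itself into the next frontier, then bulk-inserts that frontier at the level counter's depth.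
import Mathlib
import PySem

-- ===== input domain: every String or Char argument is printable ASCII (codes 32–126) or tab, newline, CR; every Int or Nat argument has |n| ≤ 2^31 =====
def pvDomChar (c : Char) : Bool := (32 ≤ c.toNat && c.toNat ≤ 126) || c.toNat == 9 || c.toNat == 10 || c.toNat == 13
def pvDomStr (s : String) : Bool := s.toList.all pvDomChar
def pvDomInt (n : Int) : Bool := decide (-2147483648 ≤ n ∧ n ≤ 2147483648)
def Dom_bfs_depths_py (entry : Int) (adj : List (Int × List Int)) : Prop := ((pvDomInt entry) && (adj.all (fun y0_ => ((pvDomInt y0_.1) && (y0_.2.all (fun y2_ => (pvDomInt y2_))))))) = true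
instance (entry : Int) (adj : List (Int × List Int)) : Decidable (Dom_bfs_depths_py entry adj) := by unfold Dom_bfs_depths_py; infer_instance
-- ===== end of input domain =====

-- B restructures A's flat index-pointer BFS queue (interleaved dist insertions, per-node dist[u]
-- reads) into staged level passes: flatten the frontier's neighbours, dedup them against dist and
-- themselves, then bulk-insert the new frontier at the level counter's depth; same return value.

-- ===== PORT A =====
-- Python's unbounded `while qi < len(q)` is run with fuel 1 + Σ|adj values|, proved sufficient below.
def bfsLoopA (adj : List (Int × List Int)) : Nat → PySem.Dict Int Int → List Int → PySem.Dict Int Int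
  | _, dist, [] => dist
  | 0, dist, _ => dist
  | fuel + 1, dist, u :: rest =>
      let du := dist.getD u 0
      let r := ((PySem.Dict.mk adj).getD u []).foldl
        (fun st v => if st.1.contains v then st else (st.1.insert v (du + 1), st.2 ++ [v]))
        (dist, ([] : List Int))
      bfsLoopA adj fuel r.1 (rest ++ r.2)

def bfs_depths_py (entry : Int) (adj : List (Int × List Int)) : List (Int × Int) :=
  (bfsLoopA adj (1 + (adj.flatMap (fun p => p.2)).length)
    (PySem.Dict.mk [(entry, 0)]) [entry]).items

-- ===== PORT B =====
-- the dedup pass: for vv in nbrs: if vv not in dist and vv not in new: new.append(vv)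
def pvCollect (dist : PySem.Dict Int Int) : List Int → List Int → List Int
  | acc, [] => acc
  | acc, v :: vs =>
      if dist.contains v || acc.contains v then pvCollect dist acc vs
      else pvCollect dist (acc ++ [v]) vs

def bfsLoopB (adj : List (Int × List Int)) : Nat → PySem.Dict Int Int → List Int → Int → PySem.Dict Int Int
  | _, dist, [], _ => dist
  | 0, dist, _, _ => dist
  | fuel + 1, dist, frontier, depth =>
      let d1 := depth + 1
      let nbrs := frontier.flatMap (fun u => (PySem.Dict.mk adj).getD u [])
      let nw := pvCollect dist [] nbrs
      bfsLoopB adj fuel (nw.foldl (fun d v => d.insert v d1) dist) nw d1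

def bfs_depths_py_alt (entry : Int) (adj : List (Int × List Int)) : List (Int × Int) :=
  (bfsLoopB adj (1 + (adj.flatMap (fun p => p.2)).length)
    (PySem.Dict.mk [(entry, 0)]) [entry] 0).items

-- ===== PRECONDITION & SPEC =====
def Spec_bfs_depths_py (entry : Int) (adj : List (Int × List Int)) (out : List (Int × Int)) : Prop := out = bfs_depths_py_alt entry adj
instance (entry : Int) (adj : List (Int × List Int)) (out : List (Int × Int)) : Decidable (Spec_bfs_depths_py entry adj out) := by unfold Spec_bfs_depths_py; infer_instance

-- ===== CLAIM (what is proved, stated in full; the proofs are below) =====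
def Claim_equal_bfs_depths_py : Prop := ∀ (entry : Int) (adj : List (Int × List Int)), Dom_bfs_depths_py entry adj → Spec_bfs_depths_py entry adj (bfs_depths_py entry adj)

-- ===== LEMMAS AND PROOFS =====

-- A's inner-loop body, named for the proofs (definitionally A's lambda)
def pvVisit (dep : Int) (st : PySem.Dict Int Int × List Int) (v : Int) : PySem.Dict Int Int × List Int :=
  if st.1.contains v then st else (st.1.insert v dep, st.2 ++ [v])

lemma bfsLoopA_cons (adj : List (Int × List Int)) (fuel : Nat) (dist : PySem.Dict Int Int)
    (u : Int) (rest : List Int) :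
    bfsLoopA adj (fuel + 1) dist (u :: rest) =
      bfsLoopA adj fuel
        (((PySem.Dict.mk adj).getD u []).foldl (pvVisit (dist.getD u 0 + 1)) (dist, [])).1
        (rest ++ (((PySem.Dict.mk adj).getD u []).foldl (pvVisit (dist.getD u 0 + 1)) (dist, [])).2) := rfl

lemma bfsLoopA_nil (adj : List (Int × List Int)) (fa : Nat) (dist : PySem.Dict Int Int) :
    bfsLoopA adj fa dist [] = dist := by cases fa <;> rfl

lemma bfsLoopB_nil (adj : List (Int × List Int)) (fb : Nat) (dist : PySem.Dict Int Int) (d : Int) :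
    bfsLoopB adj fb dist [] d = dist := by cases fb <;> rfl

-- dict membership after a bulk insert of acc
lemma contains_foldl_insert (d1 : Int) (acc : List Int) :
    ∀ (dist : PySem.Dict Int Int) (v : Int),
      (acc.foldl (fun d w => d.insert w d1) dist).contains v = (dist.contains v || acc.contains v) := by
  induction acc with
  | nil => intro dist v; simp
  | cons a acc ih =>
      intro dist v
      rw [List.foldl_cons, ih, PySem.Dict.contains_insert]
      by_cases h : v = a
      · simp [h]
      · have hb : (v == a) = false := beq_false_of_ne h
        simp [hb, h]

-- the visit fold preserves existing entries
lemma visit_fold_pres (dep : Int) (vs : List Int) :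
    ∀ (dist : PySem.Dict Int Int) (acc : List Int) (k : Int) (w : Int),
      dist.get? k = some w → (vs.foldl (pvVisit dep) (dist, acc)).1.get? k = some w := by
  induction vs with
  | nil => intro dist acc k w h; exact h
  | cons v vs ih =>
      intro dist acc k w h
      by_cases hc : dist.contains v
      · simpa [pvVisit, hc] using ih dist acc k w h
      · have hkv : k ≠ v := by
          intro he; subst he
          have hct : dist.contains k = true := by
            rw [PySem.Dict.contains_eq_isSome_get?, h]; rfl
          exact hc hct
        simp only [List.foldl_cons, pvVisit, hc]
        exact ih _ _ k w (by rw [PySem.Dict.get?_insert_of_ne dist dep hkv]; exact h)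

-- the visit fold's accumulator is only appended to
lemma visit_fold_acc (dep : Int) (vs : List Int) :
    ∀ (dist : PySem.Dict Int Int) (acc : List Int),
      vs.foldl (pvVisit dep) (dist, acc)
        = ((vs.foldl (pvVisit dep) (dist, [])).1, acc ++ (vs.foldl (pvVisit dep) (dist, [])).2) := by
  induction vs with
  | nil => intro dist acc; simp
  | cons v vs ih =>
      intro dist acc
      by_cases hc : dist.contains v
      · simp [pvVisit, hc, ih dist acc]
      · have h1 := ih (dist.insert v dep) (acc ++ [v])
        have h2 := ih (dist.insert v dep) [v]
        simp [List.foldl_cons, pvVisit, hc, h1, h2, List.append_assoc]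

-- CORE: A's interleaved visit fold equals B's dedup pass followed by B's bulk insert
lemma visit_fold_eq_collect (d1 : Int) (nbrs : List Int) :
    ∀ (dist : PySem.Dict Int Int) (acc : List Int),
      nbrs.foldl (pvVisit d1) (acc.foldl (fun d w => d.insert w d1) dist, acc)
        = ((pvCollect dist acc nbrs).foldl (fun d w => d.insert w d1) dist,
            pvCollect dist acc nbrs) := by
  induction nbrs with
  | nil => intro dist acc; simp [pvCollect]
  | cons v vs ih =>
      intro dist acc
      by_cases h : (dist.contains v || acc.contains v) = true
      · have hc : (acc.foldl (fun d w => d.insert w d1) dist).contains v = true := by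
          rw [contains_foldl_insert]; exact h
        simp only [List.foldl_cons, pvVisit, hc, if_true, pvCollect, h]
        exact ih dist acc
      · have hc : (acc.foldl (fun d w => d.insert w d1) dist).contains v = false := by
          rw [contains_foldl_insert]; simpa using h
        have hstep : ((acc.foldl (fun d w => d.insert w d1) dist).insert v d1)
            = (acc ++ [v]).foldl (fun d w => d.insert w d1) dist := by
          simp [List.foldl_append]
        simp only [List.foldl_cons, pvVisit, hc, Bool.false_eq_true, if_false, pvCollect, h]
        rw [hstep]
        exact ih dist (acc ++ [v])

-- the dedup pass produces a duplicate-free list …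
lemma pvCollect_nodup (dist : PySem.Dict Int Int) (nbrs : List Int) :
    ∀ (acc : List Int), acc.Nodup → (pvCollect dist acc nbrs).Nodup := by
  induction nbrs with
  | nil => intro acc h; simpa [pvCollect]
  | cons v vs ih =>
      intro acc h
      by_cases hc : (dist.contains v || acc.contains v) = true
      · rw [pvCollect, if_pos hc]; exact ih acc h
      · have hv : v ∉ acc := fun hm => hc (by simp [hm])
        rw [pvCollect, if_neg hc]
        refine ih (acc ++ [v]) ?_
        rw [List.nodup_append]
        refine ⟨h, List.nodup_singleton v, ?_⟩
        intro a ha b hb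
        have hbv : b = v := by simpa using hb
        subst hbv
        exact fun he => hv (he ▸ ha)

-- … of keys that are fresh for dist and drawn from nbrs
lemma pvCollect_mem (dist : PySem.Dict Int Int) (nbrs : List Int) :
    ∀ (acc : List Int) (v : Int), v ∈ pvCollect dist acc nbrs →
      v ∈ acc ∨ (dist.contains v = false ∧ v ∈ nbrs) := by
  induction nbrs with
  | nil => intro acc v h; simp [pvCollect] at h; exact Or.inl h
  | cons w vs ih =>
      intro acc v h
      by_cases hc : (dist.contains w || acc.contains w) = true
      · rw [pvCollect, if_pos hc] at h
        rcases ih acc v h with h1 | ⟨h2, h3⟩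
        · exact Or.inl h1
        · exact Or.inr ⟨h2, List.mem_cons_of_mem _ h3⟩
      · rw [pvCollect, if_neg hc] at h
        rcases ih (acc ++ [w]) v h with h1 | ⟨h2, h3⟩
        · rcases List.mem_append.mp h1 with ha | hw
          · exact Or.inl ha
          · have : v = w := by simpa using hw
            subst this
            have hdc : dist.contains v = false := by
              by_cases hd : dist.contains v = true
              · exact absurd (by simp [hd]) hc
              · simpa using hd
            exact Or.inr ⟨hdc, List.mem_cons_self⟩
        · exact Or.inr ⟨h2, List.mem_cons_of_mem _ h3⟩

-- bulk insert of fresh distinct keys: items append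
lemma items_bulk_insert (d1 : Int) (n : List Int) (dist : PySem.Dict Int Int)
    (hfresh : ∀ v ∈ n, dist.contains v = false) (hnd : n.Nodup) :
    (n.foldl (fun d w => d.insert w d1) dist).items = dist.items ++ n.map (fun v => (v, d1)) := by
  have := PySem.Dict.items_foldl_insert_fresh (l := n) (k := fun v => v) (v := fun _ => d1)
    (d := dist) (by simpa using hfresh) (by simpa using hnd)
  simpa using this

-- every value of adj.get(u, []) is an element of adj's value lists
lemma mem_getD_mk (adj : List (Int × List Int)) (u x : Int)
    (hx : x ∈ (PySem.Dict.mk adj).getD u []) : x ∈ adj.flatMap (fun p => p.2) := by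
  induction adj with
  | nil => simp [PySem.Dict.getD_eq_get?_getD, PySem.Dict.get?] at hx
  | cons p rest ih =>
      rcases p with ⟨k, vs⟩
      rw [PySem.Dict.getD_eq_get?_getD, PySem.Dict.get?_mk_cons] at hx
      by_cases hk : k == u
      · simp [hk] at hx
        simp [List.mem_flatMap]
        exact Or.inl hx
      · simp [hk, ← PySem.Dict.getD_eq_get?_getD] at hx
        simp [List.mem_flatMap]
        rcases List.mem_flatMap.mp (ih hx) with ⟨q, hq, hxq⟩
        exact Or.inr ⟨q.1, q.2, by simpa using hq, hxq⟩

-- A consumes one whole level: F.length queue steps equal ONE visit fold over the level's flatMap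
lemma bfsLoopA_level (adj : List (Int × List Int)) (d : Int) (F : List Int) :
    ∀ (fa : Nat) (dist : PySem.Dict Int Int) (G : List Int),
      (∀ u ∈ F, dist.get? u = some d) →
      bfsLoopA adj (F.length + fa) dist (F ++ G) =
        bfsLoopA adj fa
          ((F.flatMap (fun u => (PySem.Dict.mk adj).getD u [])).foldl (pvVisit (d + 1)) (dist, [])).1
          (G ++ ((F.flatMap (fun u => (PySem.Dict.mk adj).getD u [])).foldl (pvVisit (d + 1)) (dist, [])).2) := by
  induction F with
  | nil => intro fa dist G _; simp
  | cons u F ih =>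
      intro fa dist G hF
      have hdu : dist.getD u 0 = d := by
        rw [PySem.Dict.getD_eq_get?_getD, hF u List.mem_cons_self]; rfl
      set r0 := ((PySem.Dict.mk adj).getD u []).foldl (pvVisit (d + 1)) (dist, ([] : List Int)) with hr0
      have hstep : bfsLoopA adj ((u :: F).length + fa) dist ((u :: F) ++ G)
          = bfsLoopA adj (F.length + fa) r0.1 ((F ++ G) ++ r0.2) := by
        rw [show (u :: F).length + fa = (F.length + fa) + 1 by simp; omega, List.cons_append,
          bfsLoopA_cons, hdu, ← hr0]
      have hF' : ∀ w ∈ F, r0.1.get? w = some d := fun w hw =>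
        visit_fold_pres (d + 1) _ dist [] w d (hF w (List.mem_cons_of_mem _ hw))
      rw [hstep, List.append_assoc, ih fa r0.1 (G ++ r0.2) hF']
      set X := (F.flatMap (fun u => (PySem.Dict.mk adj).getD u [])).foldl (pvVisit (d + 1)) (r0.1, ([] : List Int)) with hX
      have hcomb : ((u :: F).flatMap (fun u => (PySem.Dict.mk adj).getD u [])).foldl (pvVisit (d + 1)) (dist, ([] : List Int))
          = (X.1, r0.2 ++ X.2) := by
        rw [List.flatMap_cons, List.foldl_append, ← hr0,
          show r0 = (r0.1, r0.2) from rfl, visit_fold_acc, ← hX]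
      rw [hcomb]
      simp [List.append_assoc]

lemma length_le_of_nodup_subset (l u : List Int) (h : l.Nodup) (hs : ∀ x ∈ l, x ∈ u) :
    l.length ≤ u.length := by
  calc l.length = l.toFinset.card := (List.toFinset_card_of_nodup h).symm
    _ ≤ u.toFinset.card := Finset.card_le_card (fun x hx => by
        simp only [List.mem_toFinset] at *; exact hs x hx)
    _ ≤ u.length := u.toFinset_card_le

-- main equivalence of the two loops, with explicit fuel-sufficiency measure
lemma loops_eq (adj : List (Int × List Int)) (U : List Int)
    (hU : ∀ x ∈ adj.flatMap (fun p => p.2), x ∈ U) :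
    ∀ (fb : Nat) (dist : PySem.Dict Int Int) (frontier : List Int) (d : Int) (fa : Nat),
      dist.keys.Nodup →
      (∀ k ∈ dist.keys, k ∈ U) →
      (∀ u ∈ frontier, dist.get? u = some d) →
      frontier.length + (U.length - dist.keys.length) ≤ fa →
      frontier.length + (U.length - dist.keys.length) ≤ fb →
      bfsLoopA adj fa dist frontier = bfsLoopB adj fb dist frontier d := by
  intro fb
  induction fb with
  | zero =>
      intro dist frontier d fa hnd hsub hfr hfa hfb
      have : frontier = [] := by
        cases frontier with
        | nil => rfl
        | cons u F => simp at hfb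
      subst this
      rw [bfsLoopA_nil, bfsLoopB_nil]
  | succ fb ih =>
      intro dist frontier d fa hnd hsub hfr hfa hfb
      cases frontier with
      | nil => rw [bfsLoopA_nil, bfsLoopB_nil]
      | cons u F =>
        set FR := u :: F with hFR
        set nbrs := FR.flatMap (fun u => (PySem.Dict.mk adj).getD u []) with hnbrs
        set nw := pvCollect dist [] nbrs with hnw
        obtain ⟨fa', hfa'⟩ : ∃ fa', fa = FR.length + fa' := by
          refine ⟨fa - FR.length, ?_⟩
          have : FR.length ≤ fa := le_trans (Nat.le_add_right _ _) hfa
          omega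
        -- A side: consume the whole level, then rewrite the visit fold via the CORE lemma
        have hcore := visit_fold_eq_collect (d + 1) nbrs dist []
        simp only [List.foldl_nil] at hcore
        have hA : bfsLoopA adj fa dist FR
            = bfsLoopA adj fa' (nw.foldl (fun dd w => dd.insert w (d + 1)) dist) nw := by
          have := bfsLoopA_level adj d FR fa' dist [] hfr
          rw [hfa']
          simpa [hcore, ← hnbrs, ← hnw] using this
        -- B side: one step is definitionally the same state
        have hB : bfsLoopB adj (fb + 1) dist FR d
            = bfsLoopB adj fb (nw.foldl (fun dd w => dd.insert w (d + 1)) dist) nw (d + 1) := rfl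
        -- facts about nw and the bulk-inserted dict
        have hfresh : ∀ v ∈ nw, dist.contains v = false := by
          intro v hv
          rcases pvCollect_mem dist nbrs [] v hv with h1 | ⟨h2, _⟩
          · simp at h1
          · exact h2
        have hnwnd : nw.Nodup := pvCollect_nodup dist nbrs [] List.nodup_nil
        have hitems := items_bulk_insert (d + 1) nw dist hfresh hnwnd
        have hkeys : (nw.foldl (fun dd w => dd.insert w (d + 1)) dist).keys = dist.keys ++ nw := by
          show (nw.foldl (fun dd w => dd.insert w (d + 1)) dist).items.map (·.1) = _
          rw [hitems]
          simp [PySem.Dict.keys, Function.comp_def]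
        have hnd' : (nw.foldl (fun dd w => dd.insert w (d + 1)) dist).keys.Nodup := by
          rw [hkeys, List.nodup_append]
          refine ⟨hnd, hnwnd, ?_⟩
          intro x hx y hy he
          subst he
          have hcx : dist.contains x = true := by
            rw [PySem.Dict.contains_eq_decide_mem_keys]
            simpa using hx
          rw [hfresh x hy] at hcx
          simp at hcx
        have hsub' : ∀ k ∈ (nw.foldl (fun dd w => dd.insert w (d + 1)) dist).keys, k ∈ U := by
          intro k hk
          rw [hkeys] at hk
          rcases List.mem_append.mp hk with h | h
          · exact hsub k h
          · rcases pvCollect_mem dist nbrs [] k h with h1 | ⟨_, h3⟩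
            · simp at h1
            · rcases List.mem_flatMap.mp (hnbrs ▸ h3) with ⟨w, _, hkw⟩
              exact hU k (mem_getD_mk adj w k hkw)
        have hfr' : ∀ v ∈ nw, (nw.foldl (fun dd w => dd.insert w (d + 1)) dist).get? v = some (d + 1) := by
          intro v hv
          have hmemit : (v, d + 1) ∈ (nw.foldl (fun dd w => dd.insert w (d + 1)) dist).items := by
            rw [hitems]
            exact List.mem_append_right _ (List.mem_map_of_mem hv)
          exact PySem.Dict.get?_of_mem_items _ hmemit hnd'
        have hbound : dist.keys.length + nw.length ≤ U.length := by
          have := length_le_of_nodup_subset _ U hnd' hsub'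
          rw [hkeys] at this
          simpa using this
        have hklen : (nw.foldl (fun dd w => dd.insert w (d + 1)) dist).keys.length
            = dist.keys.length + nw.length := by rw [hkeys]; simp
        have hFRlen : 1 ≤ FR.length := by simp [hFR]
        rw [hA, hB]
        exact ih _ nw (d + 1) fa' hnd' hsub' hfr' (by omega) (by omega)

-- ===== VERDICT (by name: the statement is the Claim_ definition above) =====
theorem bfs_depths_py_spec : Claim_equal_bfs_depths_py := by
  intro entry adj _
  unfold Spec_bfs_depths_py bfs_depths_py bfs_depths_py_alt
  congr 1
  have hkeys : (PySem.Dict.mk [(entry, 0)] : PySem.Dict Int Int).keys = [entry] := by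
    simp [PySem.Dict.keys]
  apply loops_eq adj (entry :: adj.flatMap (fun p => p.2))
    (fun x hx => List.mem_cons_of_mem _ hx)
  · rw [hkeys]; exact List.nodup_singleton _
  · intro k hk
    rw [hkeys] at hk
    simp at hk
    simp [hk]
  · intro w hw
    simp at hw
    subst hw
    rw [PySem.Dict.get?_mk_cons]
    simp
  · simp [hkeys]
  · simp [hkeys]
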